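-- pv_equiv track=rewrite | github.com/trevormcglaflin/ScanningAppApi | api/documentscan/doc_analysis.py | clean_image_string
-- ===== SOURCE A (Python) =====
-- def clean_image_string(image_str):
--     bad_chars = "!#$%&'()*+,-./:;<=>?@[]^_~}`{°£§|» \"\'"
--     clean_image_str = ""
--     for i in range(1, len(image_str)-1):
--         if image_str[i] == " " and image_str[i+1].isnumeric():
--             j = i+1
--             while image_str[j] != "\n" and image_str[j].isnumeric():
--                 j += 1
--             if image_str[j] == "\n":
--                 clean_image_str += image_str[i]
--         elif image_str[i] not in bad_chars:
--             clean_image_str += image_str[i]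
--     return clean_image_str
-- ===== SOURCE B (Python) =====
-- def clean_image_string(image_str):
--     bad = set("!#$%&'()*+,-./:;<=>?@[]^_~}`{°£§|» \"\'")
--     n = len(image_str)
--     # nxt[k] = smallest index >= k whose char is not a digit (n if none): one reverse pass
--     nxt = [n] * (n + 1)
--     for k in range(n - 1, -1, -1):
--         nxt[k] = nxt[k + 1] if image_str[k].isdigit() else k
--     out = []
--     for i in range(1, n - 1):
--         c = image_str[i]
--         if c == " " and image_str[i + 1].isdigit():
--             j = nxt[i + 1]
--             if j < n and image_str[j] == "\n":
--                 out.append(c)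
--         elif c not in bad:
--             out.append(c)
--     return "".join(out)
-- ===== Notes on version B (the rewrite author's own statement) =====
-- stated objective: alternative
-- what changed: B replaces A's per-space inner while-scan over the following digit run by a single reverse pass precomputing, for every position, the first non-digit index, so each space is checked with one table lookup; the bad-character test uses a set. Pre_ excludes only inputs where A raises IndexError (a space followed by digits running to the end of the string).
import Mathlib
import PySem

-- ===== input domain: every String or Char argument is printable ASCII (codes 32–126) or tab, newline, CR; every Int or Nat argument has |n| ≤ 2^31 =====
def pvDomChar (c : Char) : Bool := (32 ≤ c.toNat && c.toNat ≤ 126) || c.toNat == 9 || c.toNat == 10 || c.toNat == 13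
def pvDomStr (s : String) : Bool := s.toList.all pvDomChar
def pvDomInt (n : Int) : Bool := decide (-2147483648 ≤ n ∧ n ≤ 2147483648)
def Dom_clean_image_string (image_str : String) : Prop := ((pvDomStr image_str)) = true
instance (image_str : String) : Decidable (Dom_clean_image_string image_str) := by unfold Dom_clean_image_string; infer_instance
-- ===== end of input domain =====

-- B precomputes the first non-digit index per position in one reverse pass, replacing A's
-- per-space inner scan of the digit run by an O(1) table lookup (alternative algorithm).


-- ===== PORT A =====
-- bad_chars literal from A (the Python string repeats the apostrophe; kept verbatim)
def pvBadChars : List Char := "!#$%&'()*+,-./:;<=>?@[]^_~}`{°£§|» \"'".toList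

-- the inner `while image_str[j] != "\n" and image_str[j].isnumeric(): j += 1`;
-- walks the suffix cs.drop j; if it runs off the end (Python: IndexError, excluded by Pre_) it returns cs.length
def pvAWhile : List Char → Nat → Nat
  | [], j => j
  | c :: rest, j => if c != '\n' && PySem.Chars.isdigit c then pvAWhile rest (j + 1) else j

-- literal port of A; isnumeric = isdigit on the ASCII domain (exact on Dom);
-- the out-of-range read image_str[j] (Python IndexError, excluded by Pre_) is rendered as getD with a non-'\n' default
def clean_image_string (image_str : String) : String :=
  let cs := image_str.toList
  let n := cs.length
  String.ofList ((List.range' 1 (n - 2)).foldl (fun acc i =>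
    if cs.getD i ' ' == ' ' && PySem.Chars.isdigit (cs.getD (i + 1) ' ') then
      let j := pvAWhile (cs.drop (i + 1)) (i + 1)
      if cs.getD j '\x00' == '\n' then acc ++ [cs.getD i ' '] else acc
    else if pvBadChars.contains (cs.getD i ' ') then acc
    else acc ++ [cs.getD i ' ']) [])

-- ===== PORT B =====
-- nxt table of B: pvNxt cs k = [nxt[k], nxt[k+1], …, nxt[k + cs.length]] where nxt[p] is the
-- first non-digit index ≥ p (cs viewed as the suffix starting at absolute index k)
def pvNxt : List Char → Nat → List Nat
  | [], k => [k]
  | c :: rest, k =>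
    let tail := pvNxt rest (k + 1)
    (if PySem.Chars.isdigit c then tail.headD (k + 1) else k) :: tail

def clean_image_string_alt (image_str : String) : String :=
  let cs := image_str.toList
  let n := cs.length
  let bad : PySem.Set Char := PySem.Set.ofList "!#$%&'()*+,-./:;<=>?@[]^_~}`{°£§|» \"'".toList
  let nxt := pvNxt cs 0
  String.ofList ((List.range' 1 (n - 2)).foldl (fun acc i =>
    let c := cs.getD i ' '
    if c == ' ' && PySem.Chars.isdigit (cs.getD (i + 1) ' ') then
      let j := nxt.getD (i + 1) 0
      if decide (j < n) && (cs.getD j '\x00' == '\n') then acc ++ [c] else acc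
    else if PySem.Set.contains bad c then acc
    else acc ++ [c]) [])

-- ===== PRECONDITION & SPEC =====
-- Pre_ excludes exactly the inputs where A raises IndexError: a space at index 1..n-2 followed
-- by a digit run that reaches the very end of the string (the inner scan walks past the end).
def Pre_clean_image_string (image_str : String) : Prop :=
  ∀ i ∈ List.range' 1 (image_str.toList.length - 2),
    image_str.toList.getD i ' ' = ' ' →
    PySem.Chars.isdigit (image_str.toList.getD (i + 1) ' ') = true →
    ∃ j ∈ List.range' (i + 1) (image_str.toList.length - (i + 1)),
      PySem.Chars.isdigit (image_str.toList.getD j ' ') = false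
instance (image_str : String) : Decidable (Pre_clean_image_string image_str) := by
  unfold Pre_clean_image_string; infer_instance

def pvWitness_clean_image_string : String := "a 1\nb"

def Spec_clean_image_string (image_str : String) (out : String) : Prop := out = clean_image_string_alt image_str
instance (image_str : String) (out : String) : Decidable (Spec_clean_image_string image_str out) := by unfold Spec_clean_image_string; infer_instance

-- ===== CLAIM (what is proved, stated in full; the proofs are below) =====
def Claim_equal_clean_image_string : Prop := ∀ (image_str : String), Dom_clean_image_string image_str → Pre_clean_image_string image_str → Spec_clean_image_string image_str (clean_image_string image_str)

-- ===== LEMMAS AND PROOFS =====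

-- reference form of both scans: first index ≥ k (absolute) whose char is not a digit
def pvFirstND : List Char → Nat → Nat
  | [], k => k
  | c :: rest, k => if PySem.Chars.isdigit c then pvFirstND rest (k + 1) else k

theorem pvAWhile_eq_firstND (l : List Char) (k : Nat) : pvAWhile l k = pvFirstND l k := by
  induction l generalizing k with
  | nil => rfl
  | cons c rest ih =>
    by_cases hd : PySem.Chars.isdigit c = true
    · have hne : (c != '\n') = true := by
        have hcn : c ≠ '\n' := fun h => by subst h; exact absurd hd (by decide)
        simp [bne_iff_ne, hcn]
      simp [pvAWhile, pvFirstND, hd, hne, ih]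
    · simp [pvAWhile, pvFirstND, hd]

theorem pvNxt_ne_nil (l : List Char) (k : Nat) : pvNxt l k ≠ [] := by
  cases l <;> simp [pvNxt]

theorem pvNxt_getD (l : List Char) (k j : Nat) (hj : j ≤ l.length) :
    (pvNxt l k).getD j 0 = pvFirstND (l.drop j) (k + j) := by
  induction l generalizing k j with
  | nil =>
    have hj0 : j = 0 := Nat.le_zero.mp hj
    subst hj0
    simp [pvNxt, pvFirstND]
  | cons c rest ih =>
    cases j with
    | zero =>
      have hne := pvNxt_ne_nil rest (k + 1)
      have hhead : (pvNxt rest (k + 1)).headD (k + 1) = (pvNxt rest (k + 1)).getD 0 0 := by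
        cases h : pvNxt rest (k + 1) with
        | nil => exact absurd h hne
        | cons a t => simp
      simp only [pvNxt, List.getD_cons_zero, List.drop_zero, pvFirstND, Nat.add_zero]
      rw [hhead, ih (k + 1) 0 (Nat.zero_le _)]
      simp
    | succ j' =>
      simp only [pvNxt, List.getD_cons_succ, List.drop_succ_cons]
      rw [ih (k + 1) j' (by simpa using hj)]
      congr 1
      omega

theorem pvFirstND_le (l : List Char) (k : Nat) : pvFirstND l k ≤ k + l.length := by
  induction l generalizing k with
  | nil => simp [pvFirstND]
  | cons c rest ih =>
    by_cases hd : PySem.Chars.isdigit c = true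
    · simp only [pvFirstND, hd, if_true, List.length_cons]
      have := ih (k + 1)
      omega
    · simp [pvFirstND, hd]

theorem pvBad_contains (c : Char) :
    PySem.Set.contains (PySem.Set.ofList "!#$%&'()*+,-./:;<=>?@[]^_~}`{°£§|» \"'".toList) c
      = pvBadChars.contains c := by
  cases h : pvBadChars.contains c
  · have hnm : c ∉ pvBadChars := by simpa using h
    have : c ∉ PySem.Set.ofList "!#$%&'()*+,-./:;<=>?@[]^_~}`{°£§|» \"'".toList := by
      rw [PySem.Set.mem_ofList]; exact hnm
    simpa [PySem.Set.contains] using this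
  · have hm : c ∈ pvBadChars := by simpa using h
    have : c ∈ PySem.Set.ofList "!#$%&'()*+,-./:;<=>?@[]^_~}`{°£§|» \"'".toList := by
      rw [PySem.Set.mem_ofList]; exact hm
    simpa [PySem.Set.contains] using this

-- ===== VERDICT (by name: the statement is the Claim_ definition above) =====
theorem clean_image_string_spec : Claim_equal_clean_image_string := by
  intro s _ _
  unfold Spec_clean_image_string clean_image_string clean_image_string_alt
  simp only []
  congr 1
  apply PySem.List.foldl_congr_mem
  intro acc i hi
  have hmem := List.mem_range'_1.mp hi
  have hi1 : i + 1 ≤ s.toList.length := by omega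
  by_cases hc : (s.toList.getD i ' ' == ' ' && PySem.Chars.isdigit (s.toList.getD (i + 1) ' ')) = true
  · rw [if_pos hc, if_pos hc]
    have hj : pvAWhile (s.toList.drop (i + 1)) (i + 1)
        = (pvNxt s.toList 0).getD (i + 1) 0 := by
      rw [pvAWhile_eq_firstND, pvNxt_getD s.toList 0 (i + 1) hi1, Nat.zero_add]
    rw [← hj]
    have hle : pvAWhile (s.toList.drop (i + 1)) (i + 1) ≤ s.toList.length := by
      rw [pvAWhile_eq_firstND]
      have := pvFirstND_le (s.toList.drop (i + 1)) (i + 1)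
      simp only [List.length_drop] at this
      omega
    by_cases hlt : pvAWhile (s.toList.drop (i + 1)) (i + 1) < s.toList.length
    · have hq : pvAWhile (s.toList.drop (i + 1)) (i + 1) < s.length := by simpa using hlt
      simp [hq]
    · have hn : pvAWhile (s.toList.drop (i + 1)) (i + 1) = s.toList.length := by omega
      rw [hn]
      simp
  · rw [if_neg hc, if_neg hc, pvBad_contains]
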